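-- pv_equiv track=rewrite | github.com/levontumanyan/exercises | introductory_problems/recursive_beautiful_permutation.py | beautiful_permutation
-- ===== SOURCE A (Python) =====
-- def beautiful_permutation(sequence):
--
-- 	if len(sequence) == 1:
-- 		return sequence
--
-- 	if (len(sequence)) == 4:
-- 		return [3, 1, 4, 2]
--
-- 	if len(sequence) % 2 == 0:
-- 		return beautiful_permutation(sequence[:-1]) + [sequence[-1]]
-- 	else:
-- 		return [sequence[-1]] + beautiful_permutation(sequence[:-1])
-- ===== SOURCE B (Python) =====
-- from collections import deque
--
--
-- def beautiful_permutation(sequence):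
--     n = len(sequence)
--     if n >= 4:
--         d = deque([3, 1, 4, 2])
--         start = 4
--     else:
--         d = deque(sequence[:1])
--         start = 1
--     for k in range(start, n):
--         if (k + 1) % 2 == 0:
--             d.append(sequence[k])
--         else:
--             d.appendleft(sequence[k])
--     return list(d)
-- ===== Notes on version B (the rewrite author's own statement) =====
-- stated objective: faster
-- what changed: Replaced the recursion that copies sequence[:-1] at every level with a single iterative pass that starts from the base case ([3,1,4,2] for n>=4, the first element otherwise) and appends each further element to the back or front of a deque by index parity.
import Mathlib
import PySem

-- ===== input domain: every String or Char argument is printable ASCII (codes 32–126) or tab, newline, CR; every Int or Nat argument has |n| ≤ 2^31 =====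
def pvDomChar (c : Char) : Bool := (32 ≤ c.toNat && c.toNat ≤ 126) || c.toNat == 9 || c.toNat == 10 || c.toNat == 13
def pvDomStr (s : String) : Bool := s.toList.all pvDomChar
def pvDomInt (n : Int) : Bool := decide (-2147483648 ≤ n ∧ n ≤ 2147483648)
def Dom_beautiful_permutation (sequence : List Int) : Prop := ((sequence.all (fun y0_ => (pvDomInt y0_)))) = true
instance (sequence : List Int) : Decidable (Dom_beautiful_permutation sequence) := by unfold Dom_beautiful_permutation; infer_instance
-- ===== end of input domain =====

-- B replaces A's recursion (which re-slices sequence[:-1] at every level) with a single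
-- iterative pass from the base case, appending each element front or back by index parity.

-- ===== PORT A =====
def beautiful_permutation (sequence : List Int) : List Int :=
  if sequence.length == 1 then sequence
  else if sequence.length == 4 then [3, 1, 4, 2]
  else if sequence.length == 0 then []  -- totality guard only: Python never returns on [] (outside Pre_)
  else if sequence.length % 2 == 0 then
    beautiful_permutation (PySem.List.slice sequence none (some (-1))) ++ [PySem.List.pyGetD sequence (-1) 0]
  else
    PySem.List.pyGetD sequence (-1) 0 :: beautiful_permutation (PySem.List.slice sequence none (some (-1)))
termination_by sequence.length
decreasing_by
  all_goals
    simp only [PySem.List.slice_to_neg_one, List.length_dropLast, beq_iff_eq] at *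
    omega

-- ===== PORT B =====
def beautiful_permutation_alt (sequence : List Int) : List Int :=
  let n := sequence.length
  let base : List Int × Int :=
    if 4 ≤ n then ([3, 1, 4, 2], 4) else (PySem.List.slice sequence none (some 1), 1)
  (PySem.List.pyRange base.2 (n : Int) 1).foldl
    (fun d k =>
      let x := PySem.List.pyGetD sequence k 0
      if (k + 1) % 2 == 0 then d ++ [x] else x :: d)
    base.1

-- ===== PRECONDITION & SPEC =====
-- A never returns on the empty list (unbounded recursion); Pre_ excludes exactly that input.
def Pre_beautiful_permutation (sequence : List Int) : Prop := sequence ≠ []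
instance (sequence : List Int) : Decidable (Pre_beautiful_permutation sequence) := by
  unfold Pre_beautiful_permutation; infer_instance

def pvWitness_beautiful_permutation : List Int := [5, 6, 7, 8, 9]

def Spec_beautiful_permutation (sequence : List Int) (out : List Int) : Prop :=
  out = beautiful_permutation_alt sequence
instance (sequence : List Int) (out : List Int) : Decidable (Spec_beautiful_permutation sequence out) := by
  unfold Spec_beautiful_permutation; infer_instance

-- ===== CLAIM (what is proved, stated in full; the proofs are below) =====
def Claim_equal_beautiful_permutation : Prop :=
  ∀ (sequence : List Int), Dom_beautiful_permutation sequence →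
    Pre_beautiful_permutation sequence →
    Spec_beautiful_permutation sequence (beautiful_permutation sequence)

-- ===== LEMMAS AND PROOFS =====

-- Peeling the last element off B's single pass reproduces A's recurrence step.
theorem alt_snoc (s : List Int) (x : Int) (h1 : 1 ≤ s.length) (h3 : s.length ≠ 3) :
    beautiful_permutation_alt (s ++ [x]) =
      if (s.length + 1) % 2 == 0 then beautiful_permutation_alt s ++ [x]
      else x :: beautiful_permutation_alt s := by
  unfold beautiful_permutation_alt
  simp only [List.length_append, List.length_cons, List.length_nil]
  have hbase : (if 4 ≤ s.length + (0+1) then (([3,1,4,2] : List Int), (4:Int))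
                 else (PySem.List.slice (s ++ [x]) none (some 1), 1))
             = (if 4 ≤ s.length then (([3,1,4,2] : List Int), (4:Int))
                 else (PySem.List.slice s none (some 1), 1)) := by
    by_cases h4 : 4 ≤ s.length
    · have : 4 ≤ s.length + (0+1) := by omega
      simp [h4, this]
    · have h4' : ¬ 4 ≤ s.length + (0+1) := by omega
      simp only [h4, h4', if_false]
      rw [PySem.List.slice_to (s ++ [x]) (by norm_num), PySem.List.slice_to s (by norm_num)]
      rw [show (1:Int).toNat = 1 from rfl, List.take_append_of_le_length h1]
  rw [hbase]
  set p := (if 4 ≤ s.length then (([3,1,4,2] : List Int), (4:Int))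
            else (PySem.List.slice s none (some 1), 1)) with hp
  have hst : 0 ≤ p.2 ∧ p.2 ≤ (s.length : Int) := by
    by_cases h4 : 4 ≤ s.length
    · simp [hp, h4]
    · simp [hp, h4]
      omega
  have hcast : ((s.length + (0+1) : Nat) : Int) = (s.length : Int) + 1 := by push_cast; ring
  rw [hcast, PySem.List.pyRange_one_succ_right hst.2, List.foldl_append]
  rw [PySem.List.foldl_congr_mem (PySem.List.pyRange p.2 (s.length : Int))
    (fun d k =>
      if ((k + 1) % 2 == 0) = true then d ++ [PySem.List.pyGetD (s ++ [x]) k 0]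
      else PySem.List.pyGetD (s ++ [x]) k 0 :: d)
    (fun d k =>
      if ((k + 1) % 2 == 0) = true then d ++ [PySem.List.pyGetD s k 0]
      else PySem.List.pyGetD s k 0 :: d)
    p.1
    (by
      intro acc k hk
      rw [PySem.List.mem_pyRange_one] at hk
      have h0 : 0 ≤ k := le_trans hst.1 hk.1
      have hlt : k < (s.length : Int) := hk.2
      have hkt : k.toNat < s.length := by omega
      dsimp only
      rw [PySem.List.pyGetD_eq_getElem (s ++ [x]) 0 h0 (by simp; omega),
          PySem.List.pyGetD_eq_getElem s 0 h0 (by omega)]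
      rw [List.getElem_append_left hkt])]
  simp only [List.foldl_cons, List.foldl_nil]
  have hx : PySem.List.pyGetD (s ++ [x]) (s.length : Int) 0 = x := by
    rw [PySem.List.pyGetD_eq_getElem (s ++ [x]) 0 (by omega) (by simp)]
    simp
  rw [hx]
  have hmod : (((s.length : Int)) + 1) % 2 = (((s.length + 1) % 2 : Nat) : Int) := by
    push_cast; omega
  by_cases hpar : (s.length + 1) % 2 = 0
  · simp [hmod, hpar]
  · have : ¬ ((((s.length : Int)) + 1) % 2 = 0) := by rw [hmod]; omega
    simp [hpar, this]

theorem alt_one (a : Int) : beautiful_permutation_alt [a] = [a] := by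
  unfold beautiful_permutation_alt
  simp [PySem.List.pyRange_one_eq_nil, PySem.List.slice_to]

theorem alt_four (s : List Int) (h : s.length = 4) : beautiful_permutation_alt s = [3, 1, 4, 2] := by
  unfold beautiful_permutation_alt
  simp [h, PySem.List.pyRange_one_eq_nil]

theorem equal_aux : ∀ (s : List Int), s ≠ [] →
    beautiful_permutation s = beautiful_permutation_alt s := by
  intro s
  induction s using List.reverseRecOn with
  | nil => intro h; exact absurd rfl h
  | append_singleton t x ih =>
    intro _
    by_cases ht0 : t = []
    · subst ht0
      simp only [List.nil_append]
      rw [show beautiful_permutation [x] = [x] by unfold beautiful_permutation; simp]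
      rw [alt_one]
    · have ht1 : 1 ≤ t.length := List.length_pos_of_ne_nil ht0
      by_cases ht4 : (t ++ [x]).length = 4
      · rw [alt_four _ ht4]
        unfold beautiful_permutation
        simp only [ht4]
        norm_num
      · have hlen : (t ++ [x]).length = t.length + 1 := by simp
        have ht3 : t.length ≠ 3 := by omega
        rw [alt_snoc t x ht1 ht3, ← ih ht0]
        conv_lhs => rw [beautiful_permutation]
        have h1 : ¬ ((t ++ [x]).length == 1) = true := by simp; omega
        have h4 : ¬ ((t ++ [x]).length == 4) = true := by simp; omega
        have h0 : ¬ ((t ++ [x]).length == 0) = true := by simp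
        rw [if_neg h1, if_neg h4, if_neg h0]
        rw [PySem.List.slice_to_neg_one, List.dropLast_concat,
            PySem.List.pyGetD_neg_one_append_singleton]
        rw [hlen]

-- ===== VERDICT (by name: the statement is the Claim_ definition above) =====
theorem beautiful_permutation_spec : Claim_equal_beautiful_permutation := by
  intro s _ hpre
  unfold Spec_beautiful_permutation
  exact equal_aux s hpre
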